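-- pv_equiv track=rewrite | github.com/ZoeELin/teamwork-based-NSP | penalty.py | calculate_h1_penalty
-- ===== SOURCE A (Python) =====
-- from collections import defaultdict
--
-- def calculate_h1_penalty(assignments):
--     """
--     H1: Only one assignment per day
--     Check if a nurse has more than one shift on the same day
--     Input: nurses (from scenario), assignments (current schedule)
--     Output: penalty score (int)
--     """
--     penalty = 0
--     penalty_points = 1000
--     nurse_day_count = defaultdict(lambda: defaultdict(int))
--
--     for a in assignments:
--         nurse_day_count[a["nurse"]][a["day"]] += 1
--
--     for nurse_id, day_counts in nurse_day_count.items():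
--         for day, count in day_counts.items():
--             if count > 1:
--                 penalty += (count - 1) * penalty_points
--
--     return penalty
-- ===== SOURCE B (Python) =====
-- def calculate_h1_penalty(assignments):
--     # Count duplicates algebraically: each extra assignment of the same
--     # (nurse, day) slot beyond the first costs 1000.
--     slots = {(a["nurse"], a["day"]) for a in assignments}
--     return (len(assignments) - len(slots)) * 1000
-- ===== Notes on version B (the rewrite author's own statement) =====
-- stated objective: simpler
-- what changed: B drops A's nested per-nurse/per-day count dictionaries and grouping-then-rescan pass, computing the penalty in one pass as (number of assignments minus number of distinct (nurse, day) pairs) * 1000.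
import Mathlib
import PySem

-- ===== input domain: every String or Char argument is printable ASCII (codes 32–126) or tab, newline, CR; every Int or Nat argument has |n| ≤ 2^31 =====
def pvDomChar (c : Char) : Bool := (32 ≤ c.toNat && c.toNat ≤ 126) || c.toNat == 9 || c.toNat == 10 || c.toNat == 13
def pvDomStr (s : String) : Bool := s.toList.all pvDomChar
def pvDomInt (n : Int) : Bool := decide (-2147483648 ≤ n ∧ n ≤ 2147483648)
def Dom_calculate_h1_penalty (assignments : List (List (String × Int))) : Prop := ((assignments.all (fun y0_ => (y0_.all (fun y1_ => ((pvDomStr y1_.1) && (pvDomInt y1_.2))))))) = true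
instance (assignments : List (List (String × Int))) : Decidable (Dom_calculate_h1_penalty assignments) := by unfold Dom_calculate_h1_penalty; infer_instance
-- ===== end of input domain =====

-- B replaces A's nested count dictionaries by the identity
-- penalty = (#assignments − #distinct (nurse, day) slots) * 1000 (simpler, one pass).

-- ===== PORT A =====
-- a["nurse"] / a["day"] are ported as getD with default 0; exact under
-- Pre_calculate_h1_penalty, which guarantees both keys are present (else Python raises KeyError).
def calculate_h1_penalty (assignments : List (List (String × Int))) : Int :=
  let penalty_points : Int := 1000
  let nurse_day_count : PySem.Dict Int (PySem.Dict Int Int) :=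
    assignments.foldl (fun d a =>
      let nu := (PySem.Dict.mk a).getD "nurse" 0
      let da := (PySem.Dict.mk a).getD "day" 0
      d.insert nu ((d.getD nu PySem.Dict.empty).modify da 0 (· + 1)))
      PySem.Dict.empty
  nurse_day_count.items.foldl (fun penalty x =>
    x.2.items.foldl (fun penalty y =>
      if y.2 > 1 then penalty + (y.2 - 1) * penalty_points else penalty) penalty) 0

-- ===== PORT B =====
def calculate_h1_penalty_alt (assignments : List (List (String × Int))) : Int :=
  let slots : PySem.Set (Int × Int) :=
    PySem.Set.ofList (assignments.map (fun a =>
      ((PySem.Dict.mk a).getD "nurse" 0, (PySem.Dict.mk a).getD "day" 0)))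
  ((assignments.length : Int) - (slots.length : Int)) * 1000

-- ===== PRECONDITION & SPEC =====
-- Pre_ excludes exactly the assignments missing a "nurse" or "day" key, on which Python A raises KeyError.
def Pre_calculate_h1_penalty (assignments : List (List (String × Int))) : Prop :=
  ∀ a ∈ assignments, (PySem.Dict.mk a).contains "nurse" = true ∧ (PySem.Dict.mk a).contains "day" = true
instance (assignments : List (List (String × Int))) : Decidable (Pre_calculate_h1_penalty assignments) := by
  unfold Pre_calculate_h1_penalty; infer_instance
def pvWitness_calculate_h1_penalty : (List (List (String × Int))) :=
  [[("nurse", 1), ("day", 2)], [("nurse", 1), ("day", 2)], [("nurse", 2), ("day", 2)]]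
def Spec_calculate_h1_penalty (assignments : List (List (String × Int))) (out : Int) : Prop := out = calculate_h1_penalty_alt assignments
instance (assignments : List (List (String × Int))) (out : Int) : Decidable (Spec_calculate_h1_penalty assignments out) := by unfold Spec_calculate_h1_penalty; infer_instance

-- ===== CLAIM (what is proved, stated in full; the proofs are below) =====
def Claim_equal_calculate_h1_penalty : Prop := ∀ (assignments : List (List (String × Int))), Dom_calculate_h1_penalty assignments → Pre_calculate_h1_penalty assignments → Spec_calculate_h1_penalty assignments (calculate_h1_penalty assignments)

-- ===== LEMMAS AND PROOFS =====

-- the pair each assignment contributes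
def pvKey (a : List (String × Int)) : Int × Int :=
  ((PySem.Dict.mk a).getD "nurse" 0, (PySem.Dict.mk a).getD "day" 0)

-- A's building step, as a function of the pair only
def pvStep (d : PySem.Dict Int (PySem.Dict Int Int)) (p : Int × Int) : PySem.Dict Int (PySem.Dict Int Int) :=
  d.insert p.1 ((d.getD p.1 PySem.Dict.empty).modify p.2 0 (· + 1))

def pvDays (ps : List (Int × Int)) (nu : Int) : List Int :=
  (ps.filter (fun p => p.1 == nu)).map Prod.snd

lemma pvGetD_fold (ps : List (Int × Int)) (d : PySem.Dict Int (PySem.Dict Int Int)) (nu : Int) :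
    (ps.foldl pvStep d).getD nu PySem.Dict.empty
      = (pvDays ps nu).foldl (fun e da => e.modify da 0 (· + 1)) (d.getD nu PySem.Dict.empty) := by
  induction ps generalizing d with
  | nil => simp [pvDays]
  | cons p t ih =>
    simp only [List.foldl_cons, ih, pvDays, List.filter_cons]
    by_cases h : p.1 = nu
    · simp [h, pvStep]
    · have : (p.1 == nu) = false := by simp [h]
      simp [this, pvStep, PySem.Dict.getD_insert, Ne.symm h]

lemma pvGetD_fold_empty (ps : List (Int × Int)) (nu : Int) :
    (ps.foldl pvStep PySem.Dict.empty).getD nu PySem.Dict.empty = PySem.Dict.counter (pvDays ps nu) := by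
  rw [pvGetD_fold, PySem.Dict.counter_eq_foldl]
  simp [PySem.Dict.getD_empty]

lemma pvKeys_fold (ps : List (Int × Int)) :
    (ps.foldl pvStep PySem.Dict.empty).keys = PySem.Set.ofList (ps.map Prod.fst) := by
  have h : ps.foldl pvStep PySem.Dict.empty
      = ps.foldl (fun d x => d.insert x.1 ((d.getD x.1 PySem.Dict.empty).modify x.2 0 (· + 1)))
          PySem.Dict.empty := rfl
  rw [h, PySem.Dict.keys_foldl_insert_key ps (key := Prod.fst)
    (f := fun d p => (d.getD p.1 PySem.Dict.empty).modify p.2 0 (· + 1)) (d := PySem.Dict.empty)]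
  simp [PySem.Dict.keys_empty, PySem.Set.ofList_eq_foldl, PySem.Set.update]

lemma pvNodup_keys_fold (ps : List (Int × Int)) :
    (ps.foldl pvStep PySem.Dict.empty).keys.Nodup := by
  exact PySem.Dict.nodup_keys_foldl_insert_key ps Prod.fst
    (fun d p => (d.getD p.1 PySem.Dict.empty).modify p.2 0 (· + 1)) PySem.Dict.empty
    (by simp)

-- the if-accumulating fold is an accumulator plus a sum
lemma pvInnerFold (l : List (Int × Int)) (acc : Int) :
    l.foldl (fun penalty y => if y.2 > 1 then penalty + (y.2 - 1) * 1000 else penalty) acc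
      = acc + (l.map (fun y => if y.2 > 1 then (y.2 - 1) * 1000 else 0)).sum := by
  induction l generalizing acc with
  | nil => simp
  | cons y t ih =>
    rw [List.foldl_cons, ih, List.map_cons, List.sum_cons]
    split_ifs <;> ring

lemma pvOuterFold (l : List (Int × PySem.Dict Int Int)) (acc : Int) :
    l.foldl (fun penalty x =>
        x.2.items.foldl (fun penalty y =>
          if y.2 > 1 then penalty + (y.2 - 1) * 1000 else penalty) penalty) acc
      = acc + (l.map (fun x =>
          (x.2.items.map (fun y => if y.2 > 1 then (y.2 - 1) * 1000 else 0)).sum)).sum := by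
  induction l generalizing acc with
  | nil => simp
  | cons x t ih =>
    rw [List.foldl_cons, ih, pvInnerFold, List.map_cons, List.sum_cons]
    ring

lemma pvCount_days (ps : List (Int × Int)) (nu da : Int) :
    (pvDays ps nu).count da = ps.count (nu, da) := by
  induction ps with
  | nil => simp [pvDays]
  | cons p t ih =>
    simp only [pvDays, List.filter_cons] at *
    by_cases h : p.1 = nu
    · by_cases h2 : p.2 = da
      · have : p = (nu, da) := by cases p; simp_all
        simp [this, ih]
      · have : p ≠ (nu, da) := by cases p; simp_all
        simp [h, h2, this, ih]
    · have hb : (p.1 == nu) = false := by simp [h]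
      have : p ≠ (nu, da) := by cases p; simp_all
      simp [hb, this, ih]

-- sum over a Nodup list as a Finset sum
lemma pvSum_nodup {α : Type} [DecidableEq α] (l : List α) (hl : l.Nodup) (f : α → Int) :
    (l.map f).sum = ∑ x ∈ l.toFinset, f x := by
  rw [List.sum_toFinset f hl]

lemma pvCountInst (ps : List (Int × Int)) (x : Int × Int) :
    @List.count (Int × Int) instBEqProd x ps = @List.count (Int × Int) instBEqOfDecidableEq x ps := by
  induction ps with
  | nil => rfl
  | cons a t ih =>
    rw [@List.count_cons _ instBEqProd, @List.count_cons _ instBEqOfDecidableEq, ih]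
    have hb : (@BEq.beq _ instBEqProd a x) = (@BEq.beq _ instBEqOfDecidableEq a x) := by
      by_cases h : a = x <;> simp [h]
    rw [hb]

lemma pvSum_count (ps : List (Int × Int)) :
    ∑ q ∈ ps.toFinset, (ps.count q : Int) = (ps.length : Int) := by
  have hfs : ps.dedup.toFinset = ps.toFinset := by
    ext x; simp
  rw [← hfs, ← pvSum_nodup ps.dedup (List.nodup_dedup ps)]
  simp only [pvCountInst]
  have h := List.sum_map_count_dedup_eq_length ps
  have hc : ((ps.dedup.map fun x => (@List.count (Int × Int) instBEqOfDecidableEq x ps)).sum : Int) = ((ps.length : ℕ) : Int) := by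
    exact_mod_cast congrArg (Nat.cast : ℕ → ℤ) h
  rw [Nat.cast_list_sum, List.map_map] at hc
  simp only [Function.comp_def] at hc
  exact hc

lemma pvToFinset_ofList {α : Type} [BEq α] [LawfulBEq α] [DecidableEq α] (l : List α) :
    (PySem.Set.ofList l).toFinset = l.toFinset := by
  ext x; simp [PySem.Set.mem_ofList]

lemma pvMem_days (ps : List (Int × Int)) (nu da : Int) :
    da ∈ pvDays ps nu ↔ (nu, da) ∈ ps := by
  simp only [pvDays, List.mem_map, List.mem_filter]
  constructor
  · rintro ⟨p, ⟨hp, he⟩, rfl⟩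
    have : p.1 = nu := by simpa using he
    cases p; simp_all
  · intro h; exact ⟨(nu, da), ⟨h, by simp⟩, rfl⟩

lemma pvBiUnion (ps : List (Int × Int)) :
    ps.toFinset = ((ps.map Prod.fst).toFinset).biUnion
      (fun nu => (pvDays ps nu).toFinset.image (fun da => (nu, da))) := by
  ext q
  rcases q with ⟨x, y⟩
  simp only [List.mem_toFinset, Finset.mem_biUnion, Finset.mem_image, List.mem_map]
  constructor
  · intro h
    exact ⟨x, ⟨(x, y), h, rfl⟩, y, (pvMem_days ps x y).mpr h, rfl⟩
  · rintro ⟨nu, _, da, hda, he⟩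
    obtain ⟨rfl, rfl⟩ : nu = x ∧ da = y := by
      constructor <;> [exact congrArg Prod.fst he; exact congrArg Prod.snd he]
    exact (pvMem_days ps nu da).mp hda

lemma pvFinal (ps : List (Int × Int)) :
    ∑ q ∈ ps.toFinset, ((ps.count q : Int) - 1) * 1000
      = ((ps.length : Int) - ((PySem.Set.ofList ps).length : Int)) * 1000 := by
  have hcard : ps.toFinset.card = (PySem.Set.ofList ps).length := by
    rw [← pvToFinset_ofList]
    exact List.toFinset_card_of_nodup (PySem.Set.nodup_ofList ps)
  simp_rw [sub_mul, one_mul]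
  rw [Finset.sum_sub_distrib, ← Finset.sum_mul, pvSum_count, Finset.sum_const,
    nsmul_eq_mul, hcard]

lemma pvInner_eq (ps : List (Int × Int)) (nu : Int) :
    ((PySem.Set.ofList (pvDays ps nu)).map (fun da =>
        if ((pvDays ps nu).count da : Int) > 1
        then (((pvDays ps nu).count da : Int) - 1) * 1000 else 0)).sum
      = ∑ da ∈ (pvDays ps nu).toFinset, ((ps.count (nu, da) : Int) - 1) * 1000 := by
  rw [List.map_congr_left (g := fun da => (((pvDays ps nu).count da : Int) - 1) * 1000)
    (by
      intro da hda
      rw [PySem.Set.mem_ofList] at hda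
      have h1 : 1 ≤ (pvDays ps nu).count da := List.one_le_count_iff.mpr hda
      by_cases h : ((pvDays ps nu).count da : Int) > 1
      · simp [h]
      · have : (pvDays ps nu).count da = 1 := by omega
        simp [this])]
  rw [pvSum_nodup _ (PySem.Set.nodup_ofList _), pvToFinset_ofList]
  exact Finset.sum_congr rfl (by intro da _; rw [pvCount_days])

lemma pvMain (ps : List (Int × Int)) :
    (((ps.foldl pvStep PySem.Dict.empty).items).map (fun x =>
      (x.2.items.map (fun y => if y.2 > 1 then (y.2 - 1) * 1000 else 0)).sum)).sum
      = ((ps.length : Int) - ((PySem.Set.ofList ps).length : Int)) * 1000 := by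
  rw [PySem.Dict.items_eq_map_keys _ (pvNodup_keys_fold ps) PySem.Dict.empty,
    pvKeys_fold, List.map_map]
  simp only [Function.comp_def]
  have hfn : ∀ nu ∈ PySem.Set.ofList (ps.map Prod.fst),
      (((ps.foldl pvStep PySem.Dict.empty).getD nu PySem.Dict.empty).items.map
        (fun y => if y.2 > 1 then (y.2 - 1) * 1000 else 0)).sum
      = ∑ da ∈ (pvDays ps nu).toFinset, ((ps.count (nu, da) : Int) - 1) * 1000 := by
    intro nu _
    rw [pvGetD_fold_empty, PySem.Dict.items_counter, List.map_map, ← pvInner_eq]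
    rfl
  rw [List.map_congr_left hfn, pvSum_nodup _ (PySem.Set.nodup_ofList _), pvToFinset_ofList,
    ← pvFinal ps, pvBiUnion ps]
  rw [Finset.sum_biUnion]
  · refine Finset.sum_congr rfl ?_
    intro nu _
    rw [Finset.sum_image]
    intro a _ b _ h
    exact congrArg Prod.snd h
  · intro a _ b _ hab
    refine Finset.disjoint_left.mpr ?_
    rintro ⟨x, y⟩ hx hy
    simp only [Finset.mem_image] at hx hy
    obtain ⟨da, _, he⟩ := hx
    obtain ⟨db, _, he'⟩ := hy
    have h1 : a = x := congrArg Prod.fst he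
    have h2 : b = x := congrArg Prod.fst he'
    exact hab (h1.trans h2.symm)

-- ===== VERDICT (by name: the statement is the Claim_ definition above) =====
theorem calculate_h1_penalty_spec : Claim_equal_calculate_h1_penalty := by
  intro assignments _ _
  unfold Spec_calculate_h1_penalty calculate_h1_penalty calculate_h1_penalty_alt
  have hmk : assignments.map (fun a =>
      ((PySem.Dict.mk a).getD "nurse" 0, (PySem.Dict.mk a).getD "day" 0))
      = assignments.map pvKey := rfl
  have hfold : assignments.foldl (fun d a =>
      let nu := (PySem.Dict.mk a).getD "nurse" 0
      let da := (PySem.Dict.mk a).getD "day" 0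
      d.insert nu ((d.getD nu PySem.Dict.empty).modify da 0 (· + 1))) PySem.Dict.empty
      = (assignments.map pvKey).foldl pvStep PySem.Dict.empty := by
    rw [List.foldl_map]; rfl
  simp only [hfold]
  rw [pvOuterFold, zero_add, pvMain, hmk, List.length_map]
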